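-- pv_equiv track=rewrite | github.com/btthao/wordle-solver | letter-frequency.py | is_possible_solution
-- ===== SOURCE A (Python) =====
-- def is_possible_solution(word, guess, guessResult):
--     # c - correct; p - present; a - absent
--     for i in range(len(guessResult)):
--         if guessResult[i] == 'c' and word[i] != guess[i]:
--             return False
--         elif guessResult[i] == 'p':
--             if guess[i] == word[i]:
--                 return False
--             elif guess[i] not in word:
--                 return False
--         elif guessResult[i] == 'a':
--             absent = True
--             for k in range(len(guess)):
--                 if guess[k] == guess[i] and k != i and guessResult[k] != 'a':
--                     absent = False
--                     break
--
--             if absent and guess[i] in word: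
--                 return False
--             elif not absent and guess[i] == word[i]:
--                 return False
--
--     return True
-- ===== SOURCE B (Python) =====
-- def is_possible_solution(word, guess, guessResult):
--     # Letter-centric algorithm: group the guess positions by letter, then judge each
--     # letter's whole group at once ("claimed" = this letter got some non-absent feedback).
--     slots = {}
--     for i, (g, r) in enumerate(zip(guess, guessResult)):
--         slots.setdefault(g, []).append((i, r))
--     for g, occ in slots.items():
--         claimed = any(r != 'a' for _, r in occ)
--         for i, r in occ:
--             if r == 'c':
--                 if word[i] != g:
--                     return False
--             elif r == 'p':
--                 if word[i] == g or g not in word: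
--                     return False
--             elif r == 'a':
--                 if claimed:
--                     if word[i] == g:
--                         return False
--                 elif g in word:
--                     return False
--     return True
-- ===== Notes on version B (the rewrite author's own statement) =====
-- stated objective: alternative
-- what changed: B regroups the guess positions by letter into a dict built in one pass and judges each letter's whole group at once with a per-letter 'claimed' flag, instead of A's per-position loop that rescans the entire guess inside every 'a' branch.
-- outside the precondition, e.g. on is_possible_solution('a', 'ab', 'pc'): A returns False, B returns False; on is_possible_solution('ab', 'aaa', 'ca'): A returns True, B returns True
import Mathlib
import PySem

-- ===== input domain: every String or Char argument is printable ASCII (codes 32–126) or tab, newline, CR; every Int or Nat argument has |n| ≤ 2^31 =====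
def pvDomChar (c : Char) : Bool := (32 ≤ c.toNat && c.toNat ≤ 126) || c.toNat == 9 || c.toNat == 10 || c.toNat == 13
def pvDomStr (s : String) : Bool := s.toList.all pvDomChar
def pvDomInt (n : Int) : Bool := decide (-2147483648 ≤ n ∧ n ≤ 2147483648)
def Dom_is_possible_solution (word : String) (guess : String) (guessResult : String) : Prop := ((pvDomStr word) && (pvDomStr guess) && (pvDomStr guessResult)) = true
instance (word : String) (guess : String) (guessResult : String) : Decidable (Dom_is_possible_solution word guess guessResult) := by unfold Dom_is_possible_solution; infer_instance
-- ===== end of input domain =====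

-- B is a letter-centric re-decomposition: it groups the guess positions by letter into a dict
-- and judges each letter's whole group at once, instead of A's per-position loop with an inner
-- rescan of the guess (objective: alternative; same return value on Pre_).

-- ===== PORT A =====
-- inner k-loop of the 'a' branch: 'absent' stays true iff no k with guess[k]==guess[i], k≠i, guessResult[k]≠'a'
-- (indices read by the Python are in range under Pre_, so getD is exact there)
def pvA_absent (guess gr : List Char) (i : Nat) : Bool :=
  (List.range guess.length).all (fun k =>
    !(guess.getD k ' ' == guess.getD i ' ' && decide (k ≠ i) && !(gr.getD k ' ' == 'a')))

-- the main for-loop of A with early returns, index i, fuel = remaining iterations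
def pvA_go (w g gr : List Char) (i : Nat) : Nat → Bool
  | 0 => true
  | fuel + 1 =>
    if gr.getD i ' ' == 'c' && !(w.getD i ' ' == g.getD i ' ') then false
    else if gr.getD i ' ' == 'p' then
      if g.getD i ' ' == w.getD i ' ' then false
      else if !(w.contains (g.getD i ' ')) then false
      else pvA_go w g gr (i + 1) fuel
    else if gr.getD i ' ' == 'a' then
      let absent := pvA_absent g gr i
      if absent && w.contains (g.getD i ' ') then false
      else if !absent && g.getD i ' ' == w.getD i ' ' then false
      else pvA_go w g gr (i + 1) fuel
    else pvA_go w g gr (i + 1) fuel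

def is_possible_solution (word : String) (guess : String) (guessResult : String) : Bool :=
  pvA_go word.toList guess.toList guessResult.toList 0 guessResult.toList.length

-- ===== PORT B =====
-- slots.setdefault(g, []).append((i, r))  over  enumerate(zip(guess, guessResult))
-- (modify at key g appends (i, r) to the group list, exactly the Python mutation)
def pvB_groups (g gr : List Char) : PySem.Dict Char (List (Int × Char)) :=
  ((PySem.List.enumerate (g.zip gr) 0).map (fun e => (e.2.1, (e.1, e.2.2)))).foldl
    (fun d p => d.modify p.1 [] (fun occ => occ ++ [p.2])) PySem.Dict.empty

-- claimed = any(r != 'a' for _, r in occ)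
def pvB_claimed (occ : List (Int × Char)) : Bool := occ.any (fun e => !(e.2 == 'a'))

-- inner 'for i, r in occ' loop with early returns (indices read are in range under Pre_, so pyGetD is exact there)
def pvB_checkOcc (w : List Char) (c : Char) (cl : Bool) : List (Int × Char) → Bool
  | [] => true
  | e :: rest =>
    if e.2 == 'c' then
      if !(PySem.List.pyGetD w e.1 ' ' == c) then false else pvB_checkOcc w c cl rest
    else if e.2 == 'p' then
      if PySem.List.pyGetD w e.1 ' ' == c || !(w.contains c) then false else pvB_checkOcc w c cl rest
    else if e.2 == 'a' then
      if cl then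
        if PySem.List.pyGetD w e.1 ' ' == c then false else pvB_checkOcc w c cl rest
      else
        if w.contains c then false else pvB_checkOcc w c cl rest
    else pvB_checkOcc w c cl rest

-- outer 'for g, occ in slots.items()' loop
def pvB_outer (w : List Char) : List (Char × List (Int × Char)) → Bool
  | [] => true
  | p :: rest =>
    if pvB_checkOcc w p.1 (pvB_claimed p.2) p.2 then pvB_outer w rest else false

def is_possible_solution_alt (word : String) (guess : String) (guessResult : String) : Bool :=
  pvB_outer word.toList (pvB_groups guess.toList guessResult.toList).items

-- ===== PRECONDITION & SPEC =====
-- Pre_ is the natural domain of A's lazy indexing (every index A's loop can read is in range);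
-- outside it A raises IndexError at a data-dependent point unless an early `return False` fires
-- first, so some mismatched-length inputs on which A happens to return early are excluded too.
def Pre_is_possible_solution (word : String) (guess : String) (guessResult : String) : Prop :=
  ∀ i ∈ List.range guessResult.toList.length,
    ((guessResult.toList.getD i ' ' = 'c' ∨ guessResult.toList.getD i ' ' = 'p') →
      i < word.toList.length ∧ i < guess.toList.length) ∧
    (guessResult.toList.getD i ' ' = 'a' →
      i < word.toList.length ∧ i < guess.toList.length ∧
      ∀ k ∈ List.range guess.toList.length,
        guess.toList.getD k ' ' = guess.toList.getD i ' ' → k ≠ i →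
        k < guessResult.toList.length)
instance (word : String) (guess : String) (guessResult : String) : Decidable (Pre_is_possible_solution word guess guessResult) := by unfold Pre_is_possible_solution; infer_instance

def pvWitness_is_possible_solution : String × String × String := ("crane", "slate", "aapac")

def Spec_is_possible_solution (word : String) (guess : String) (guessResult : String) (out : Bool) : Prop := out = is_possible_solution_alt word guess guessResult
instance (word : String) (guess : String) (guessResult : String) (out : Bool) : Decidable (Spec_is_possible_solution word guess guessResult out) := by unfold Spec_is_possible_solution; infer_instance

-- ===== CLAIM (what is proved, stated in full; the proofs are below) =====
def Claim_equal_is_possible_solution : Prop := ∀ (word : String) (guess : String) (guessResult : String), Dom_is_possible_solution word guess guessResult → Pre_is_possible_solution word guess guessResult → Spec_is_possible_solution word guess guessResult (is_possible_solution word guess guessResult)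

-- ===== LEMMAS AND PROOFS =====

-- 'letter c got some non-'a' feedback at a zipped position' (the letter-level claimed/non-absent flag)
def pvNA (g gr : List Char) (c : Char) : Bool :=
  (g.zip gr).any (fun q => q.1 == c && !(q.2 == 'a'))

-- the per-position pass condition both programs decide (with the letter-level flag)
def pvCheck (w g gr : List Char) (j : Nat) : Bool :=
  if gr.getD j ' ' == 'c' then w.getD j ' ' == g.getD j ' '
  else if gr.getD j ' ' == 'p' then !(g.getD j ' ' == w.getD j ' ') && w.contains (g.getD j ' ')
  else if gr.getD j ' ' == 'a' then
    (if pvNA g gr (g.getD j ' ') then !(g.getD j ' ' == w.getD j ' ') else !(w.contains (g.getD j ' ')))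
  else true

lemma pvNA_iff (g gr : List Char) (c : Char) :
    pvNA g gr c = true ↔ ∃ k, ∃ _ : k < g.length, ∃ _ : k < gr.length, g[k] = c ∧ gr[k] ≠ 'a' := by
  simp only [pvNA, List.any_eq_true, Bool.and_eq_true, beq_iff_eq, Bool.not_eq_true',
    beq_eq_false_iff_ne]
  constructor
  · rintro ⟨⟨x, y⟩, hmem, hx, hy⟩
    rw [List.mem_iff_getElem] at hmem
    obtain ⟨k, hk, hget⟩ := hmem
    rw [List.length_zip] at hk
    have h1 : k < g.length := lt_of_lt_of_le hk (min_le_left _ _)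
    have h2 : k < gr.length := lt_of_lt_of_le hk (min_le_right _ _)
    rw [List.getElem_zip] at hget
    obtain ⟨hgx, hgy⟩ := Prod.mk.injEq .. ▸ hget
    exact ⟨k, h1, h2, hgx ▸ hx, hgy ▸ hy⟩
  · rintro ⟨k, h1, h2, hval, hne⟩
    refine ⟨(g[k], gr[k]), ?_, hval, hne⟩
    exact List.mem_iff_getElem.mpr ⟨k, by simp [List.length_zip, h1, h2], by rw [List.getElem_zip]⟩

lemma pvA_absent_eq (g gr : List Char) (j : Nat) (ha : gr.getD j ' ' = 'a')
    (hdup : ∀ k < g.length, g.getD k ' ' = g.getD j ' ' → k ≠ j → k < gr.length) :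
    pvA_absent g gr j = !(pvNA g gr (g.getD j ' ')) := by
  rw [Bool.eq_iff_iff]
  rw [Bool.not_eq_true', ← Bool.not_eq_true (pvNA g gr (g.getD j ' '))]
  rw [pvNA_iff]
  simp only [pvA_absent, List.all_eq_true, List.mem_range, Bool.not_eq_true',
    Bool.and_eq_false_iff, Bool.not_eq_false', beq_iff_eq, beq_eq_false_iff_ne, ne_eq,
    decide_eq_false_iff_not, Decidable.not_not, not_exists]
  constructor
  · intro hall k h1 h2
    rintro ⟨hkv, hka⟩
    have hki : k ≠ j := fun hk => hka (by
      rw [← List.getD_eq_getElem gr ' ' h2, hk]; exact ha)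
    rcases hall k h1 with (hg | hk) | hgr
    · exact hg (by rw [List.getD_eq_getElem g ' ' h1]; exact hkv)
    · exact hki hk
    · exact hka (by rw [← List.getD_eq_getElem gr ' ' h2]; exact hgr)
  · intro hnone k hk
    by_cases hkv : g.getD k ' ' = g.getD j ' '
    · by_cases hkj : k = j
      · left; right; exact hkj
      · have h2 : k < gr.length := hdup k hk hkv hkj
        have hx := hnone k hk h2
        right
        by_contra hgr
        exact hx ⟨by rw [← List.getD_eq_getElem g ' ' hk]; exact hkv,
          by rw [← List.getD_eq_getElem gr ' ' h2]; exact hgr⟩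
    · left; left; exact hkv

lemma pvA_go_iff (w g gr : List Char)
    (hpre : ∀ i < gr.length,
      ((gr.getD i ' ' = 'c' ∨ gr.getD i ' ' = 'p') → i < w.length ∧ i < g.length) ∧
      (gr.getD i ' ' = 'a' → i < w.length ∧ i < g.length ∧
        ∀ k < g.length, g.getD k ' ' = g.getD i ' ' → k ≠ i → k < gr.length)) :
    ∀ fuel i, i + fuel = gr.length →
      (pvA_go w g gr i fuel = true ↔ ∀ j, i ≤ j → j < gr.length → pvCheck w g gr j = true) := by
  intro fuel
  induction fuel with
  | zero =>
    intro i hlen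
    exact ⟨fun _ j h1 h2 => absurd h2 (by omega), fun _ => rfl⟩
  | succ fuel ih =>
    intro i hlen
    have hi : i < gr.length := by omega
    have ih' := ih (i + 1) (by omega)
    have hsplit : (∀ j, i ≤ j → j < gr.length → pvCheck w g gr j = true) ↔
        (pvCheck w g gr i = true ∧ ∀ j, i + 1 ≤ j → j < gr.length → pvCheck w g gr j = true) := by
      constructor
      · intro h; exact ⟨h i le_rfl hi, fun j h1 h2 => h j (by omega) h2⟩
      · rintro ⟨h0, hrest⟩ j h1 h2
        rcases Nat.eq_or_lt_of_le h1 with rfl | hlt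
        · exact h0
        · exact hrest j (by omega) h2
    rw [hsplit, ← ih']
    simp only [pvA_go]
    by_cases hc : gr[i]?.getD ' ' = 'c'
    · by_cases h2 : w[i]?.getD ' ' = g[i]?.getD ' ' <;> simp [pvCheck, hc, h2]
    · by_cases hp : gr[i]?.getD ' ' = 'p'
      · simp [pvCheck, hp, and_assoc]
      · by_cases ha : gr[i]?.getD ' ' = 'a'
        · have ha' : gr.getD i ' ' = 'a' := by rw [List.getD_eq_getElem?_getD]; exact ha
          have habs := pvA_absent_eq g gr i ha' (fun k hk => ((hpre i hi).2 ha').2.2 k hk)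
          have habs' : pvA_absent g gr i = !(pvNA g gr (g[i]?.getD ' ')) := by
            rw [habs, List.getD_eq_getElem?_getD]
          by_cases hna : pvNA g gr (g[i]?.getD ' ') = true <;>
            simp [pvCheck, ha, habs', hna]
        · simp [pvCheck, hc, hp, ha]

lemma pvB_checkOcc_eq_all (w : List Char) (c : Char) (cl : Bool) (occ : List (Int × Char)) :
    pvB_checkOcc w c cl occ = occ.all (fun e =>
      if e.2 == 'c' then PySem.List.pyGetD w e.1 ' ' == c
      else if e.2 == 'p' then !(PySem.List.pyGetD w e.1 ' ' == c) && w.contains c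
      else if e.2 == 'a' then (if cl then !(PySem.List.pyGetD w e.1 ' ' == c) else !(w.contains c))
      else true) := by
  induction occ with
  | nil => rfl
  | cons e rest ih =>
    simp only [pvB_checkOcc, List.all_cons, ih]
    by_cases h1 : e.2 == 'c'
    · by_cases h2 : PySem.List.pyGetD w e.1 ' ' == c <;> simp [h1, h2]
    · by_cases h2 : e.2 == 'p'
      · by_cases h3 : PySem.List.pyGetD w e.1 ' ' == c
        · simp [h1, h2, h3]
        · simp [h1, h2, h3]
      · by_cases h3 : e.2 == 'a'
        · cases cl
          · simp [h1, h2, h3]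
          · by_cases h4 : PySem.List.pyGetD w e.1 ' ' == c
            · simp [h1, h2, h3, h4]
            · simp [h1, h2, h3, h4]
        · simp [h1, h2, h3]

lemma pvB_outer_eq_all (w : List Char) (l : List (Char × List (Int × Char))) :
    pvB_outer w l = l.all (fun p => pvB_checkOcc w p.1 (pvB_claimed p.2) p.2) := by
  induction l with
  | nil => rfl
  | cons p rest ih =>
    simp only [pvB_outer, List.all_cons]
    by_cases h : pvB_checkOcc w p.1 (pvB_claimed p.2) p.2 <;> simp [h, ih]

-- the association list B folds into the dict, characterised pointwise
lemma pvL_mem (g gr : List Char) (p : Char × (Int × Char)) :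
    p ∈ (PySem.List.enumerate (g.zip gr) 0).map (fun e => (e.2.1, (e.1, e.2.2))) ↔
      ∃ k, ∃ _ : k < g.length, ∃ _ : k < gr.length, p = (g[k], ((k : Int), gr[k])) := by
  simp only [List.mem_map, PySem.List.mem_enumerate_iff, List.length_zip, lt_min_iff]
  constructor
  · rintro ⟨e, ⟨k, hk, rfl⟩, rfl⟩
    exact ⟨k, hk.1, hk.2, by simp [List.getElem_zip]⟩
  · rintro ⟨k, h1, h2, rfl⟩
    exact ⟨((0 : Int) + k, (g.zip gr)[k]'(by simp [List.length_zip, h1, h2])),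
      ⟨k, ⟨h1, h2⟩, rfl⟩, by simp [List.getElem_zip]⟩

-- the group of letter c holds exactly c's zipped positions, so its 'claimed' flag is pvNA
lemma pvClaimed_eq (g gr : List Char) (c : Char) :
    pvB_claimed ((((PySem.List.enumerate (g.zip gr) 0).map (fun e => (e.2.1, (e.1, e.2.2)))).filter
        (fun p => p.1 == c)).map (·.2)) = pvNA g gr c := by
  rw [Bool.eq_iff_iff, pvNA_iff]
  simp only [pvB_claimed, List.any_eq_true, List.mem_map, List.mem_filter, Bool.not_eq_true',
    beq_eq_false_iff_ne, ne_eq, beq_iff_eq]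
  constructor
  · rintro ⟨e, ⟨p, ⟨hp, hpc⟩, rfl⟩, hne⟩
    obtain ⟨k, h1, h2, rfl⟩ := (pvL_mem g gr p).mp (List.mem_map.mpr hp)
    exact ⟨k, h1, h2, hpc, hne⟩
  · rintro ⟨k, h1, h2, hval, hne⟩
    exact ⟨((k : Int), gr[k]), ⟨(g[k], ((k : Int), gr[k])),
      ⟨List.mem_map.mp ((pvL_mem g gr _).mpr ⟨k, h1, h2, rfl⟩), hval⟩, rfl⟩, hne⟩

-- a group entry of letter c coming from zipped position k decides exactly pvCheck k
lemma pvEntryCheck (w g gr : List Char) (k : Nat) (h1 : k < g.length) (h2 : k < gr.length) :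
    (if ((k : Int), gr[k]).2 == 'c' then PySem.List.pyGetD w ((k : Int), gr[k]).1 ' ' == g[k]
     else if ((k : Int), gr[k]).2 == 'p' then
       !(PySem.List.pyGetD w ((k : Int), gr[k]).1 ' ' == g[k]) && w.contains g[k]
     else if ((k : Int), gr[k]).2 == 'a' then
       (if pvNA g gr g[k] then !(PySem.List.pyGetD w ((k : Int), gr[k]).1 ' ' == g[k])
        else !(w.contains g[k]))
     else true) = pvCheck w g gr k := by
  simp only [pvCheck, PySem.List.pyGetD_natCast, List.getD_eq_getElem?_getD,
    List.getElem?_eq_getElem h1, List.getElem?_eq_getElem h2, Option.getD_some]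
  rw [BEq.comm (a := w[k]?.getD ' ') (b := g[k])]

lemma pvB_alt_iff (w g gr : List Char) :
    pvB_outer w (pvB_groups g gr).items = true ↔
      ∀ k, ∀ _ : k < g.length, k < gr.length → pvCheck w g gr k = true := by
  have hnodup : (pvB_groups g gr).keys.Nodup := by
    unfold pvB_groups
    exact PySem.Dict.nodup_keys_foldl_modify_key _ _ _ _ _ (by simp [PySem.Dict.keys_empty])
  have hgetD : ∀ c, (pvB_groups g gr).getD c [] =
      (((PySem.List.enumerate (g.zip gr) 0).map (fun e => (e.2.1, (e.1, e.2.2)))).filter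
        (fun p => p.1 == c)).map (·.2) := by
    intro c
    unfold pvB_groups
    rw [PySem.Dict.getD_foldl_modify_append]
    simp [PySem.Dict.getD_empty]
  have hitems : (pvB_groups g gr).items =
      (pvB_groups g gr).keys.map (fun c => (c, (pvB_groups g gr).getD c [])) :=
    PySem.Dict.items_eq_map_keys _ hnodup []
  have hkeys : ∀ c, c ∈ (pvB_groups g gr).keys ↔
      ∃ k, ∃ _ : k < g.length, k < gr.length ∧ g[k] = c := by
    intro c
    unfold pvB_groups
    rw [PySem.Dict.keys_foldl_modify_key, PySem.Set.mem_update]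
    rw [PySem.Dict.keys_empty]
    constructor
    · rintro (hin | hin)
      · exact absurd hin (List.not_mem_nil)
      · obtain ⟨p, hp, rfl⟩ := List.mem_map.mp hin
        obtain ⟨k, h1, h2, rfl⟩ := (pvL_mem g gr p).mp hp
        exact ⟨k, h1, h2, rfl⟩
    · rintro ⟨k, h1, h2, rfl⟩
      exact Or.inr (List.mem_map.mpr
        ⟨(g[k], ((k : Int), gr[k])), (pvL_mem g gr _).mpr ⟨k, h1, h2, rfl⟩, rfl⟩)
  have hcl : ∀ c, pvB_claimed ((pvB_groups g gr).getD c []) = pvNA g gr c := by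
    intro c; rw [hgetD]; exact pvClaimed_eq g gr c
  rw [pvB_outer_eq_all, hitems, List.all_map, List.all_eq_true]
  constructor
  · intro h k h1 h2
    have hmem : g[k] ∈ (pvB_groups g gr).keys := (hkeys _).mpr ⟨k, h1, h2, rfl⟩
    have hA := h _ hmem
    simp only [Function.comp_apply] at hA
    rw [pvB_checkOcc_eq_all, List.all_eq_true] at hA
    have hent : ((k : Int), gr[k]) ∈ (pvB_groups g gr).getD (g[k]) [] := by
      rw [hgetD]
      exact List.mem_map.mpr ⟨(g[k], ((k : Int), gr[k])), List.mem_filter.mpr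
        ⟨(pvL_mem g gr _).mpr ⟨k, h1, h2, rfl⟩, by simp⟩, rfl⟩
    have hE := hA _ hent
    simp only [hcl] at hE
    rw [← pvEntryCheck w g gr k h1 h2]
    simpa using hE
  · intro h c hmem
    simp only [Function.comp_apply]
    rw [pvB_checkOcc_eq_all, List.all_eq_true]
    intro e he
    rw [hgetD] at he
    obtain ⟨p, hpf, rfl⟩ := List.mem_map.mp he
    have hpL := List.mem_filter.mp hpf
    obtain ⟨k, h1, h2, rfl⟩ := (pvL_mem g gr p).mp hpL.1
    have hpc : g[k] = c := by simpa using hpL.2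
    subst hpc
    simp only [hcl]
    exact (pvEntryCheck w g gr k h1 h2).trans (h k h1 h2)

-- ===== VERDICT (by name: the statement is the Claim_ definition above) =====
theorem is_possible_solution_spec : Claim_equal_is_possible_solution := by
  intro word guess guessResult _ hpre
  unfold Spec_is_possible_solution is_possible_solution is_possible_solution_alt
  have hpre' : ∀ i < guessResult.toList.length,
      ((guessResult.toList.getD i ' ' = 'c' ∨ guessResult.toList.getD i ' ' = 'p') →
        i < word.toList.length ∧ i < guess.toList.length) ∧
      (guessResult.toList.getD i ' ' = 'a' →
        i < word.toList.length ∧ i < guess.toList.length ∧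
        ∀ k < guess.toList.length,
          guess.toList.getD k ' ' = guess.toList.getD i ' ' → k ≠ i →
          k < guessResult.toList.length) := by
    intro i hi
    have h := hpre i (List.mem_range.mpr hi)
    exact ⟨h.1, fun ha => ⟨(h.2 ha).1, (h.2 ha).2.1,
      fun k hk => (h.2 ha).2.2 k (List.mem_range.mpr hk)⟩⟩
  rw [Bool.eq_iff_iff,
    pvA_go_iff word.toList guess.toList guessResult.toList hpre' guessResult.toList.length 0
      (by omega),
    pvB_alt_iff]
  constructor
  · intro h k h1 h2
    exact h k (Nat.zero_le _) h2
  · intro h j _ hj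
    by_cases hjg : j < guess.toList.length
    · exact h j hjg hj
    · have hn := hpre' j hj
      have hc : guessResult.toList.getD j ' ' ≠ 'c' := fun hx => hjg (hn.1 (Or.inl hx)).2
      have hp : guessResult.toList.getD j ' ' ≠ 'p' := fun hx => hjg (hn.1 (Or.inr hx)).2
      have ha : guessResult.toList.getD j ' ' ≠ 'a' := fun hx => hjg (hn.2 hx).2.1
      simp only [pvCheck]
      rw [if_neg (by simpa using hc), if_neg (by simpa using hp), if_neg (by simpa using ha)]
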